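-- pv_equiv track=rewrite | github.com/nokibul/ai-english-coach | english_learner_app/ai_service.py | _describe_phrase_use
-- ===== SOURCE A (Python) =====
-- def _describe_phrase_use(phrase: str) -> str:
--     lowered = phrase.casefold()
--     if lowered.startswith(("in the ", "at the ", "on the ", "behind the ", "near the ")):
--         return "a natural way to describe where something appears in the scene"
--     if any(word in lowered for word in {"foreground", "background", "center", "centre", "subject"}):
--         return "useful for showing position and visual focus in an image"
--     if any(word in lowered for word in {"standing", "facing", "wearing", "holding", "looking", "smiling"}):
--         return "useful for describing posture, action, or appearance in a natural way"
--     if any(word in lowered for word in {"glow", "light", "lighting", "shadow"}):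
--         return "useful for talking about light and the visual atmosphere of a scene"
--     if any(word in lowered for word in {"smile", "expression", "eyes"}):
--         return "useful for describing facial expression in a natural way"
--     if any(word in lowered for word in {"calm", "peaceful", "dramatic", "confidence", "mood", "atmosphere"}):
--         return "useful for describing the mood or feeling created by the image"
--     if any(
--         word in lowered
--         for word in {
--             "looks like",
--             "appears to",
--             "seems to",
--             "you can tell",
--             "gives the impression",
--             "conveys a feeling of",
--             "evoking a sense of",
--             "creating a sense of",
--             "giving a sense of",
--         }
--     ):
--         return "useful when you want to make a natural interpretation based on what you can see"
--     return "a natural phrase that helps you describe a photo more clearly in everyday English"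
-- ===== SOURCE B (Python) =====
-- # B: exhaustive-scan + priority-min selection instead of A's short-circuit if ladder.
-- # Every individual pattern is tested; the smallest (highest-priority) matching rule
-- # index wins; index 7 (the default) is the starting accumulator.
--
-- _RESULTS = [
--     "a natural way to describe where something appears in the scene",
--     "useful for showing position and visual focus in an image",
--     "useful for describing posture, action, or appearance in a natural way",
--     "useful for talking about light and the visual atmosphere of a scene",
--     "useful for describing facial expression in a natural way",
--     "useful for describing the mood or feeling created by the image",
--     "useful when you want to make a natural interpretation based on what you can see",
--     "a natural phrase that helps you describe a photo more clearly in everyday English",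
-- ]
--
-- _PATTERNS = (
--     [(0, True, p) for p in ("in the ", "at the ", "on the ", "behind the ", "near the ")]
--     + [(1, False, w) for w in ("foreground", "background", "center", "centre", "subject")]
--     + [(2, False, w) for w in ("standing", "facing", "wearing", "holding", "looking", "smiling")]
--     + [(3, False, w) for w in ("glow", "light", "lighting", "shadow")]
--     + [(4, False, w) for w in ("smile", "expression", "eyes")]
--     + [(5, False, w) for w in ("calm", "peaceful", "dramatic", "confidence", "mood", "atmosphere")]
--     + [(6, False, w) for w in ("looks like", "appears to", "seems to", "you can tell",
--                                "gives the impression", "conveys a feeling of",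
--                                "evoking a sense of", "creating a sense of",
--                                "giving a sense of")]
-- )
--
-- def _describe_phrase_use(phrase: str) -> str:
--     lowered = phrase.casefold()
--     best = len(_RESULTS) - 1
--     for prio, is_prefix, pat in _PATTERNS:
--         if lowered.startswith(pat) if is_prefix else pat in lowered:
--             best = min(best, prio)
--     return _RESULTS[best]
-- ===== Notes on version B (the rewrite author's own statement) =====
-- stated objective: alternative
-- what changed: Replaced the short-circuit if ladder by an exhaustive single pass over a flat pattern list that tests every pattern and keeps the minimum (highest-priority) matching rule index in an accumulator, then indexes a result table; no early return, selection is by min over priorities.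
import Mathlib
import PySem

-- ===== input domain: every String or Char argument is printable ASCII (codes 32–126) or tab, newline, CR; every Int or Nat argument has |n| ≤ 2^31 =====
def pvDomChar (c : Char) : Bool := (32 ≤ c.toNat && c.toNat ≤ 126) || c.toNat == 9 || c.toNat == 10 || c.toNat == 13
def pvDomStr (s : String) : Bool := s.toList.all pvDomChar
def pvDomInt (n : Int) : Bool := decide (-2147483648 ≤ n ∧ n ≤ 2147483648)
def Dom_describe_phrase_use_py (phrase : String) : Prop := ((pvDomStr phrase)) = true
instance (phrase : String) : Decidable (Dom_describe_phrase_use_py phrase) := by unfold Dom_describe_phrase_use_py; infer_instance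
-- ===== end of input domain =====

-- B replaces A's short-circuit if ladder by one exhaustive pass over a flat pattern list,
-- keeping the minimum matching rule index, then indexing a result table (alternative; same cost).
-- casefold is ported as PySem.Str.lower, exact on the ASCII domain.

-- ===== PORT A =====
def describe_phrase_use_py (phrase : String) : String :=
  let lowered := PySem.Str.lower phrase
  -- startswith with a tuple of prefixes = any of the single-prefix tests
  if ["in the ", "at the ", "on the ", "behind the ", "near the "].any
      (fun p => PySem.Str.startswith lowered p) then
    "a natural way to describe where something appears in the scene"
  else if ["foreground", "background", "center", "centre", "subject"].any
      (fun w => PySem.Str.isIn w lowered) then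
    "useful for showing position and visual focus in an image"
  else if ["standing", "facing", "wearing", "holding", "looking", "smiling"].any
      (fun w => PySem.Str.isIn w lowered) then
    "useful for describing posture, action, or appearance in a natural way"
  else if ["glow", "light", "lighting", "shadow"].any
      (fun w => PySem.Str.isIn w lowered) then
    "useful for talking about light and the visual atmosphere of a scene"
  else if ["smile", "expression", "eyes"].any
      (fun w => PySem.Str.isIn w lowered) then
    "useful for describing facial expression in a natural way"
  else if ["calm", "peaceful", "dramatic", "confidence", "mood", "atmosphere"].any
      (fun w => PySem.Str.isIn w lowered) then
    "useful for describing the mood or feeling created by the image"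
  else if ["looks like", "appears to", "seems to", "you can tell", "gives the impression",
           "conveys a feeling of", "evoking a sense of", "creating a sense of",
           "giving a sense of"].any (fun w => PySem.Str.isIn w lowered) then
    "useful when you want to make a natural interpretation based on what you can see"
  else
    "a natural phrase that helps you describe a photo more clearly in everyday English"

-- ===== PORT B =====
def pvResults : List String :=
  [ "a natural way to describe where something appears in the scene",
    "useful for showing position and visual focus in an image",
    "useful for describing posture, action, or appearance in a natural way",
    "useful for talking about light and the visual atmosphere of a scene",
    "useful for describing facial expression in a natural way",
    "useful for describing the mood or feeling created by the image",
    "useful when you want to make a natural interpretation based on what you can see",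
    "a natural phrase that helps you describe a photo more clearly in everyday English" ]

-- the flat pattern list, built by tagging each group with its rule index, as in Source B
def pvPatterns : List (Nat × Bool × String) :=
  (["in the ", "at the ", "on the ", "behind the ", "near the "].map (fun p => (0, true, p)))
  ++ (["foreground", "background", "center", "centre", "subject"].map (fun w => (1, false, w)))
  ++ (["standing", "facing", "wearing", "holding", "looking", "smiling"].map (fun w => (2, false, w)))
  ++ (["glow", "light", "lighting", "shadow"].map (fun w => (3, false, w)))
  ++ (["smile", "expression", "eyes"].map (fun w => (4, false, w)))
  ++ (["calm", "peaceful", "dramatic", "confidence", "mood", "atmosphere"].map (fun w => (5, false, w)))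
  ++ (["looks like", "appears to", "seems to", "you can tell", "gives the impression",
       "conveys a feeling of", "evoking a sense of", "creating a sense of",
       "giving a sense of"].map (fun w => (6, false, w)))

def describe_phrase_use_py_alt (phrase : String) : String :=
  let lowered := PySem.Str.lower phrase
  let best := pvPatterns.foldl
    (fun b t =>
      if (if t.2.1 then PySem.Str.startswith lowered t.2.2 else PySem.Str.isIn t.2.2 lowered)
      then Nat.min b t.1 else b)
    (pvResults.length - 1)
  -- best is always < pvResults.length, so getD is exact for _RESULTS[best]
  pvResults.getD best ""

-- ===== PRECONDITION & SPEC =====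
def Spec_describe_phrase_use_py (phrase : String) (out : String) : Prop := out = describe_phrase_use_py_alt phrase
instance (phrase : String) (out : String) : Decidable (Spec_describe_phrase_use_py phrase out) := by unfold Spec_describe_phrase_use_py; infer_instance

-- ===== CLAIM (what is proved, stated in full; the proofs are below) =====
def Claim_equal_describe_phrase_use_py : Prop := ∀ (phrase : String), Dom_describe_phrase_use_py phrase → Spec_describe_phrase_use_py phrase (describe_phrase_use_py phrase)

-- ===== LEMMAS AND PROOFS =====

-- one rule group of the fold collapses to an if on the group's `any`
theorem foldl_minif (f : String → Bool) (i : Nat) (pats : List String) (acc : Nat) :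
    pats.foldl (fun a p => if f p then Nat.min a i else a) acc
      = if pats.any f then Nat.min acc i else acc := by
  induction pats generalizing acc with
  | nil => simp
  | cons h t ih =>
    by_cases hf : f h <;>
      simp [List.foldl_cons, List.any_cons, hf, ih]

-- ===== VERDICT (by name: the statement is the Claim_ definition above) =====
set_option maxHeartbeats 2000000 in
theorem describe_phrase_use_py_spec : Claim_equal_describe_phrase_use_py := by
  intro phrase _
  unfold Spec_describe_phrase_use_py describe_phrase_use_py describe_phrase_use_py_alt
    pvPatterns pvResults
  simp only [List.foldl_append, List.foldl_map, if_true,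
    Bool.false_eq_true, if_false, foldl_minif]
  generalize (["in the ", "at the ", "on the ", "behind the ", "near the "].any
      (fun p => PySem.Str.startswith (PySem.Str.lower phrase) p)) = b0
  generalize (["foreground", "background", "center", "centre", "subject"].any
      (fun w => PySem.Str.isIn w (PySem.Str.lower phrase))) = b1
  generalize (["standing", "facing", "wearing", "holding", "looking", "smiling"].any
      (fun w => PySem.Str.isIn w (PySem.Str.lower phrase))) = b2
  generalize (["glow", "light", "lighting", "shadow"].any
      (fun w => PySem.Str.isIn w (PySem.Str.lower phrase))) = b3
  generalize (["smile", "expression", "eyes"].any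
      (fun w => PySem.Str.isIn w (PySem.Str.lower phrase))) = b4
  generalize (["calm", "peaceful", "dramatic", "confidence", "mood", "atmosphere"].any
      (fun w => PySem.Str.isIn w (PySem.Str.lower phrase))) = b5
  generalize (["looks like", "appears to", "seems to", "you can tell", "gives the impression",
      "conveys a feeling of", "evoking a sense of", "creating a sense of",
      "giving a sense of"].any
      (fun w => PySem.Str.isIn w (PySem.Str.lower phrase))) = b6
  cases b0 <;> cases b1 <;> cases b2 <;> cases b3 <;> cases b4 <;> cases b5 <;> cases b6 <;> rfl
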